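-- pv_equiv track=rewrite | github.com/AdamZhouSE/pythonHomework | Code/CodeRecords/2199/60829/273402.py | ju
-- ===== SOURCE A (Python) =====
-- def ju(a,b):
--     count=0
--     for i in range(0,len(a)-len(b)+1):
--         if a[i]==b[0]:
--             judge=0
--             for j in range(0,len(b)):
--                 if  not a[i+j]==b[j]:
--                     judge=1
--                     break
--             if judge==0:
--                 count=count+1
--     if count>1:
--         return True
--     else:
--         return False
-- ===== SOURCE B (Python) =====
-- def ju(a, b):
--     i = a.find(b)
--     if i == -1:
--         return False
--     return a.find(b, i + 1) != -1
-- ===== Notes on version B (the rewrite author's own statement) =====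
-- stated objective: faster
-- what changed: Replaced the hand-written position-by-position scan with two calls to str.find (first occurrence, then first occurrence after it), stopping as soon as a second occurrence is known.
import Mathlib
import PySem

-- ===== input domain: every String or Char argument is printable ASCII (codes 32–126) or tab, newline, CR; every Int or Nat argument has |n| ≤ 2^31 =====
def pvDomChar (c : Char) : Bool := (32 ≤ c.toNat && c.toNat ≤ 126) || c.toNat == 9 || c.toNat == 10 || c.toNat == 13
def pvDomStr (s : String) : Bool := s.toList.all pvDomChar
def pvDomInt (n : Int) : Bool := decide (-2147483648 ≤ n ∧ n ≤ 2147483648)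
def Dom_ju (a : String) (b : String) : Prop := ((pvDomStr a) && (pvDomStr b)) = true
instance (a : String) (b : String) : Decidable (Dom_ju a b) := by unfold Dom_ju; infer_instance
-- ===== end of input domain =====

-- B replaces A's hand-written scan of every start position by two first-occurrence
-- searches (find, then find from just past the first hit): objective 'faster'.

-- ===== PORT A =====
-- inner 'for j in range(0,len(b))' loop computing the flag 'judge' (break = returning 1 early)
def juJudge (al bl : List Char) (i : Int) : List Int → Int
  | [] => 0
  | j :: js =>
      if !(PySem.List.pyGetD al (i + j) ' ' == PySem.List.pyGetD bl j ' ') then 1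
      else juJudge al bl i js

def ju (a : String) (b : String) : Bool :=
  let al := a.toList
  let bl := b.toList
  let count : Int :=
    (PySem.List.pyRange 0 (PySem.List.len al - PySem.List.len bl + 1) 1).foldl
      (fun count i =>
        if PySem.List.pyGetD al i ' ' == PySem.List.pyGetD bl 0 ' ' then
          if juJudge al bl i (PySem.List.pyRange 0 (PySem.List.len bl) 1) == 0 then count + 1
          else count
        else count) 0
  if count > 1 then true else false

-- ===== PORT B =====
def ju_alt (a : String) (b : String) : Bool :=
  let i := PySem.Str.find a b
  if i == -1 then false
  else PySem.Str.findFrom a b (i + 1) != -1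

-- ===== PRECONDITION & SPEC =====
-- Pre_ excludes only b = "", on which A raises IndexError (b[0] on the empty pattern).
def Pre_ju (a : String) (b : String) : Prop := b ≠ ""
instance (a : String) (b : String) : Decidable (Pre_ju a b) := by unfold Pre_ju; infer_instance
def pvWitness_ju : String × String := ("abab", "ab")

def Spec_ju (a : String) (b : String) (out : Bool) : Prop := out = ju_alt a b
instance (a : String) (b : String) (out : Bool) : Decidable (Spec_ju a b out) := by unfold Spec_ju; infer_instance

-- ===== CLAIM (what is proved, stated in full; the proofs are below) =====
def Claim_equal_ju : Prop := ∀ (a : String) (b : String), Dom_ju a b → Pre_ju a b → Spec_ju a b (ju a b)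

-- ===== LEMMAS AND PROOFS =====

-- the inner loop returns 0 iff every compared position agrees
lemma juJudge_map_eq_zero_iff (al bl : List Char) (i : Nat) (js : List Nat) :
    juJudge al bl (i : Int) (List.map (fun j : Nat => (j : Int)) js) = 0 ↔
      ∀ j ∈ js, al.getD (i + j) ' ' = bl.getD j ' ' := by
  induction js with
  | nil => exact ⟨fun _ j hj => absurd hj (by simp), fun _ => rfl⟩
  | cons j js ih =>
    have hcast : (i : Int) + (j : Int) = ((i + j : Nat) : Int) := by push_cast; ring
    simp only [List.map_cons, juJudge, hcast, PySem.List.pyGetD_natCast,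
      List.getD_eq_getElem?_getD] at ih ⊢
    by_cases hc : al[i + j]?.getD ' ' = bl[j]?.getD ' ' <;> simp [hc, ih]

-- pointwise agreement on defaults equals the prefix relation, when the window fits
lemma prefix_iff_getD (al bl : List Char) (i : Nat) (h : i + bl.length ≤ al.length) :
    bl <+: al.drop i ↔ ∀ j < bl.length, al.getD (i + j) ' ' = bl.getD j ' ' := by
  rw [List.prefix_iff_getElem?]
  constructor
  · intro H j hj
    have h1 : i + j < al.length := by omega
    have hh := H j hj
    rw [List.getElem?_drop, List.getElem?_eq_getElem h1] at hh
    rw [List.getD_eq_getElem al ' ' h1, List.getD_eq_getElem bl ' ' hj]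
    exact Option.some_inj.mp hh
  · intro H j hj
    have h1 : i + j < al.length := by omega
    rw [List.getElem?_drop, List.getElem?_eq_getElem h1]
    have hh := H j hj
    rw [List.getD_eq_getElem al ' ' h1, List.getD_eq_getElem bl ' ' hj] at hh
    exact congrArg some hh

-- A's per-position test (first-char check and inner loop) is exactly "occurrence at i"
lemma cond_iff_occ (al bl : List Char) (i : Nat) (hm : 1 ≤ bl.length)
    (h : i + bl.length ≤ al.length) :
    ((PySem.List.pyGetD al (i : Int) ' ' == PySem.List.pyGetD bl 0 ' ') &&
      (juJudge al bl (i : Int) (PySem.List.pyRange 0 (PySem.List.len bl) 1) == 0)) = true ↔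
      bl <+: al.drop i := by
  have hrange : PySem.List.pyRange 0 (PySem.List.len bl) 1 =
      List.map (fun k : Nat => (k : Int)) (List.range bl.length) := by
    rw [PySem.List.len_eq]; exact PySem.List.pyRange_zero_natCast bl.length
  rw [prefix_iff_getD al bl i h, hrange]
  simp only [Bool.and_eq_true, beq_iff_eq, PySem.List.pyGetD_natCast, PySem.List.pyGetD_zero]
  rw [juJudge_map_eq_zero_iff al bl i (List.range bl.length)]
  simp only [List.mem_range]
  constructor
  · rintro ⟨_, h2⟩ j hj
    exact h2 j hj
  · intro H
    refine ⟨?_, fun j hj => H j hj⟩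
    have := H 0 hm
    simpa using this

-- the counted fold is a countP over the range of start positions
lemma count_eq_countP (al bl : List Char) (hm : 1 ≤ bl.length) (hn : bl.length ≤ al.length) :
    ((PySem.List.pyRange 0 (PySem.List.len al - PySem.List.len bl + 1) 1).foldl
      (fun count i =>
        if PySem.List.pyGetD al i ' ' == PySem.List.pyGetD bl 0 ' ' then
          if juJudge al bl i (PySem.List.pyRange 0 (PySem.List.len bl) 1) == 0 then count + 1
          else count
        else count) (0 : Int)) =
      ((List.range (al.length - bl.length + 1)).countP (fun j => decide (bl <+: al.drop j)) : Int) := by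
  have hbody : (fun (count : Int) (i : Int) =>
      if PySem.List.pyGetD al i ' ' == PySem.List.pyGetD bl 0 ' ' then
        if juJudge al bl i (PySem.List.pyRange 0 (PySem.List.len bl) 1) == 0 then count + 1
        else count
      else count) =
      fun (count : Int) (i : Int) =>
      if ((PySem.List.pyGetD al i ' ' == PySem.List.pyGetD bl 0 ' ') &&
          (juJudge al bl i (PySem.List.pyRange 0 (PySem.List.len bl) 1) == 0)) then count + 1
      else count := by
    funext c i
    by_cases h1 : (PySem.List.pyGetD al i ' ' == PySem.List.pyGetD bl 0 ' ') = true <;>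
      by_cases h2 : (juJudge al bl i (PySem.List.pyRange 0 (PySem.List.len bl) 1) == 0) = true <;>
        simp [h1, h2]
  have hN : PySem.List.len al - PySem.List.len bl + 1 = ((al.length - bl.length + 1 : Nat) : Int) := by
    simp only [PySem.List.len_eq]; omega
  rw [hbody, PySem.List.foldl_if_add_one, hN, PySem.List.pyRange_zero_natCast, List.countP_map,
    zero_add]
  congr 1
  apply List.countP_congr
  intro x hx
  have hx' : x < al.length - bl.length + 1 := List.mem_range.mp hx
  simp only [Function.comp]
  rw [cond_iff_occ al bl x hm (by omega)]
  simp

-- two or more hits in the range = one hit strictly after the first one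
lemma two_le_countP_iff (N i₀ : Nat) (p : Nat → Bool) (hi : i₀ < N) (hp : p i₀ = true)
    (hmin : ∀ j < i₀, ¬ p j = true) :
    2 ≤ (List.range N).countP p ↔ ∃ j, i₀ < j ∧ j < N ∧ p j = true := by
  have hsplit : List.range N =
      List.range (i₀ + 1) ++ (List.range (N - (i₀ + 1))).map (fun x => (i₀ + 1) + x) := by
    rw [← List.range_add]; congr 1; omega
  have h1 : (List.range (i₀ + 1)).countP p = 1 := by
    rw [List.range_succ, List.countP_append]
    have hz : (List.range i₀).countP p = 0 :=
      List.countP_eq_zero.mpr (fun a ha => hmin a (List.mem_range.mp ha))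
    simp [hz, hp]
  rw [hsplit, List.countP_append, h1, List.countP_map]
  constructor
  · intro h
    have hpos : 0 < (List.range (N - (i₀ + 1))).countP (p ∘ fun x => i₀ + 1 + x) := by omega
    obtain ⟨t, ht, hpt⟩ := List.countP_pos_iff.mp hpos
    have ht' : t < N - (i₀ + 1) := List.mem_range.mp ht
    exact ⟨i₀ + 1 + t, by omega, by omega, hpt⟩
  · rintro ⟨j, hj1, hj2, hj3⟩
    have hpos : 0 < (List.range (N - (i₀ + 1))).countP (p ∘ fun x => i₀ + 1 + x) := by
      apply List.countP_pos_iff.mpr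
      refine ⟨j - (i₀ + 1), List.mem_range.mpr (by omega), ?_⟩
      simpa [Function.comp, show i₀ + 1 + (j - (i₀ + 1)) = j by omega] using hj3
    omega

-- ===== VERDICT (by name: the statement is the Claim_ definition above) =====
theorem ju_spec : Claim_equal_ju := by
  intro a b _ hpre
  unfold Spec_ju
  have hb0 : b.toList ≠ [] := by
    intro h
    exact hpre (by cases b with | _ l => simpa using h)
  have hm : 1 ≤ b.toList.length := by
    have := List.length_pos_of_ne_nil hb0
    omega
  set al := a.toList with hal
  set bl := b.toList with hbl
  by_cases hn : bl.length ≤ al.length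
  · -- the pattern fits at least once by length
    simp only [ju, ju_alt, PySem.Str.find_eq, PySem.Str.findFrom_eq, ← hal, ← hbl]
    rw [count_eq_countP al bl hm hn]
    set f := PySem.Chars.find al bl with hf
    by_cases hfneg : f = -1
    · -- no occurrence at all
      have hninf : ¬ bl <:+: al := (PySem.Chars.find_eq_neg_one_iff al bl).mp hfneg
      have hz : (List.range (al.length - bl.length + 1)).countP
          (fun j => decide (bl <+: al.drop j)) = 0 := by
        apply List.countP_eq_zero.mpr
        intro j _ hj
        exact hninf ((PySem.Chars.isIn_iff_infix bl al).mp
          ((PySem.Chars.exists_prefix_drop_iff_isIn bl al).mp ⟨j, of_decide_eq_true hj⟩))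
      simp [hfneg, hz]
    · -- at least one occurrence; compare with the one after it
      have hf0 : (0 : Int) ≤ f := by
        have := PySem.Chars.neg_one_le_find al bl
        omega
      obtain ⟨hocc, hmin⟩ := PySem.Chars.find_spec (s := al) (sub := bl) hf0
      set i₀ := f.toNat with hi₀
      have hfi : f = (i₀ : Int) := (Int.toNat_of_nonneg hf0).symm
      have hi₀m : i₀ + bl.length ≤ al.length := by
        have := hocc.length_le
        rw [List.length_drop] at this
        have hfl : f ≤ (al.length : Int) := PySem.Chars.find_le_length al bl
        omega
      have hk : i₀ + 1 ≤ al.length := by omega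
      have hiff := PySem.Chars.findFrom_natCast_eq_neg_one_iff al bl (i₀ + 1) hk
      have hAiff : 2 ≤ (List.range (al.length - bl.length + 1)).countP
          (fun j => decide (bl <+: al.drop j)) ↔ bl <:+: al.drop (i₀ + 1) := by
        rw [two_le_countP_iff (al.length - bl.length + 1) i₀
          (fun j => decide (bl <+: al.drop j)) (by omega) (by simpa using hocc)
          (fun j hj h => hmin j hj (of_decide_eq_true h))]
        constructor
        · rintro ⟨j, hj1, _, hj3⟩
          have hpj : bl <+: al.drop j := of_decide_eq_true hj3
          have : bl <+: (al.drop (i₀ + 1)).drop (j - (i₀ + 1)) := by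
            rw [List.drop_drop, show (i₀ + 1) + (j - (i₀ + 1)) = j by omega]
            exact hpj
          exact (PySem.Chars.isIn_iff_infix bl (al.drop (i₀ + 1))).mp
            ((PySem.Chars.exists_prefix_drop_iff_isIn bl (al.drop (i₀ + 1))).mp
              ⟨j - (i₀ + 1), this⟩)
        · intro hinf
          obtain ⟨t, ht⟩ := (PySem.Chars.exists_prefix_drop_iff_isIn bl (al.drop (i₀ + 1))).mpr
            ((PySem.Chars.isIn_iff_infix bl (al.drop (i₀ + 1))).mpr hinf)
          rw [List.drop_drop] at ht
          have hlen := ht.length_le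
          rw [List.length_drop] at hlen
          exact ⟨(i₀ + 1) + t, by omega, by omega, decide_eq_true ht⟩
      have hfne : (f == -1) = false := by simp [hfneg]
      by_cases h2 : 2 ≤ (List.range (al.length - bl.length + 1)).countP
          (fun j => decide (bl <+: al.drop j))
      · have hgt : ((((List.range (al.length - bl.length + 1)).countP
            (fun j => decide (bl <+: al.drop j))) : Int)) > 1 := by exact_mod_cast h2
        have hne : PySem.Chars.findFrom al bl (f + 1) ≠ -1 := by
          rw [hfi, show ((i₀ : Int) + 1) = ((i₀ + 1 : Nat) : Int) by omega]
          intro hcon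
          exact (hiff.mp hcon) (hAiff.mp h2)
        simp [hgt, hfne, hne]
      · have hle : ¬ ((((List.range (al.length - bl.length + 1)).countP
            (fun j => decide (bl <+: al.drop j))) : Int) > 1) := by
          push_cast
          omega
        have heq : PySem.Chars.findFrom al bl (f + 1) = -1 := by
          rw [hfi, show ((i₀ : Int) + 1) = ((i₀ + 1 : Nat) : Int) by omega]
          apply hiff.mpr
          intro hinf
          exact h2 (hAiff.mpr hinf)
        simp [hle, hfne, heq]
  · -- pattern longer than the text: no occurrence possible
    have hn' : al.length < bl.length := by omega
    have hempty : PySem.List.pyRange 0 ((al.length : Int) - (bl.length : Int) + 1) 1 = [] := by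
      rw [List.eq_nil_iff_forall_not_mem]
      intro x hx
      have hmem := PySem.List.mem_pyRange_one.mp hx
      omega
    have hninf : ¬ bl <:+: al := fun h => by
      have := h.length_le
      omega
    have hfneg : PySem.Chars.find al bl = -1 := (PySem.Chars.find_eq_neg_one_iff al bl).mpr hninf
    simp [ju, ju_alt, PySem.Str.find_eq, PySem.List.len_eq, ← hal, ← hbl, hempty, hfneg]
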